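-- pv_equiv track=rewrite | github.com/Andrey-Figueroa/Python-2024 | ProyectoCifrado.py | codificarPorClave
-- ===== SOURCE A (Python) =====
-- def posicionLetra(letra):
--     letra = letra.lower()
--     posicion = ord(letra)-ord("a")+1
--     return posicion
--
-- def nuevaLetraPorClave(pLetra1,pLetra2):
--     posicion1 = posicionLetra(pLetra1)
--     posicion2 = posicionLetra(pLetra2)
--     nuevaLetra = posicion1 + posicion2
--     if(nuevaLetra >= 26):
--         nuevaLetra -= 26
--     letras = "abcdefghijklmnopqrstuvwxyz"
--     nuevaLetra = letras[nuevaLetra-1]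
--     return nuevaLetra
--
-- def codificarPorClave(pCadena,pClave):
--     criptado = ""
--     indice = 0
--     for letra in pCadena:
--         if(indice >= len(pClave)):
--             indice = 0
--         if(letra != " "):
--             letraNueva = nuevaLetraPorClave(letra,pClave[indice])
--             criptado += letraNueva
--             indice += 1
--         else:
--             criptado += " "
--             indice = 0
--     return criptado
-- ===== SOURCE B (Python) =====
-- def codificarPorClave(pCadena, pClave):
--     # first pass: align each position of pCadena with the key character A would use
--     # (None marks a space); second pass: closed-form shift chr(97 + (sum-193) % 26)
--     aligned = []
--     i = 0
--     for ch in pCadena: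
--         if ch == " ":
--             aligned.append(None)
--             i = 0
--         else:
--             if i >= len(pClave):
--                 i = 0
--             aligned.append(pClave[i])
--             i += 1
--     return "".join(
--         " " if k is None
--         else chr(97 + (ord(c.lower()) + ord(k.lower()) - 193) % 26)
--         for c, k in zip(pCadena, aligned)
--     )
-- ===== Notes on version B (the rewrite author's own statement) =====
-- stated objective: alternative
-- what changed: B replaces A's single accumulate-as-you-go loop (conditional subtract-26 plus alphabet-string indexing, building the result by repeated string concatenation) with a two-pass decomposition: an alignment pass pairing each text position with its key character (or a space marker), then a single ''.join mapping each pair through the closed form chr(97+(ord(c.lower())+ord(k.lower())-193)%26).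
-- outside the precondition, e.g. on codificarPorClave('a', 'a!'): A returns 'b', B returns 'b'
import Mathlib
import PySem

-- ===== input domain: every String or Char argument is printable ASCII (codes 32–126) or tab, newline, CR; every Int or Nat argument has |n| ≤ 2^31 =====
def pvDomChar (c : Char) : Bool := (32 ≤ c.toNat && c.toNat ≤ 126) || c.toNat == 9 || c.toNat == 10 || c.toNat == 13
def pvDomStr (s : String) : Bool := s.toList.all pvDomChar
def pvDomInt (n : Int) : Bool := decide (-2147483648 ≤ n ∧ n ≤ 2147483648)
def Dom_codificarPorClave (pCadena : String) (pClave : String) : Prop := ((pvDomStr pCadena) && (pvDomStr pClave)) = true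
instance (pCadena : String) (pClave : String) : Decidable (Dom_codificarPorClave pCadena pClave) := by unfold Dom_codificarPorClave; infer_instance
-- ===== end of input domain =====

-- B replaces A's per-character conditional subtraction and alphabet-string indexing by a
-- two-pass decomposition (key-alignment pass, then a closed-form chr(97+(sum-193)%26) join).

-- ===== PORT A =====
def posicionLetra (letra : Char) : Int :=
  (letra.toLower.toNat : Int) - 97 + 1

def nuevaLetraPorClave (pLetra1 pLetra2 : Char) : Char :=
  let posicion1 := posicionLetra pLetra1
  let posicion2 := posicionLetra pLetra2
  let nuevaLetra := posicion1 + posicion2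
  let nuevaLetra := if nuevaLetra ≥ 26 then nuevaLetra - 26 else nuevaLetra
  let letras : List Char := "abcdefghijklmnopqrstuvwxyz".toList
  -- Python letras[nuevaLetra-1]; raises (none) outside Pre_, defaulted there
  (PySem.List.pyGet? letras (nuevaLetra - 1)).getD ' '

def codificarPorClaveLoop (clave : List Char) :
    List Char → List Char → Int → List Char
  | criptado, [], _ => criptado
  | criptado, letra :: rest, indice =>
    let indice := if indice ≥ (clave.length : Int) then 0 else indice
    if letra ≠ ' ' then
      codificarPorClaveLoop clave
        (criptado ++ [nuevaLetraPorClave letra ((PySem.List.pyGet? clave indice).getD ' ')])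
        rest (indice + 1)
    else
      codificarPorClaveLoop clave (criptado ++ [' ']) rest 0

def codificarPorClave (pCadena : String) (pClave : String) : String :=
  String.ofList (codificarPorClaveLoop pClave.toList [] pCadena.toList 0)

-- ===== PORT B =====
-- first pass: key character aligned with each position (none marks a space)
def alignLoop (clave : List Char) :
    List (Option Char) → List Char → Int → List (Option Char)
  | acc, [], _ => acc
  | acc, ch :: rest, i =>
    if ch = ' ' then alignLoop clave (acc ++ [none]) rest 0
    else
      let i := if i ≥ (clave.length : Int) then 0 else i
      alignLoop clave (acc ++ [PySem.List.pyGet? clave i]) rest (i + 1)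

-- second pass: closed-form shift chr(97 + (ord(c.lower())+ord(k.lower())-193) % 26)
def codifChar (c : Char) (k : Option Char) : Char :=
  match k with
  | none => ' '
  | some k =>
      Char.ofNat (97 +
        (PySem.Int.mod ((c.toLower.toNat : Int) + (k.toLower.toNat : Int) - 193) 26).toNat)

def codificarPorClave_alt (pCadena : String) (pClave : String) : String :=
  String.ofList
    ((pCadena.toList.zip (alignLoop pClave.toList [] pCadena.toList 0)).map
      (fun p => codifChar p.1 p.2))

-- ===== PRECONDITION & SPEC =====
-- Pre_ excludes the inputs on which A's letras[nuevaLetra-1] lookup raises IndexError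
-- (the shifted position of some text/key character pair falls outside -26..25) or where the
-- empty key makes pClave[indice] raise; since which key character aligns with which text
-- character is data-dependent, the bound is required of EVERY text/key pair, so it is
-- conservative: it also excludes some inputs whose only out-of-range pair is never aligned
-- (A returns there, and B returns the same value).
def Pre_codificarPorClave (pCadena : String) (pClave : String) : Prop :=
  (((!pClave.toList.isEmpty) || pCadena.toList.all (· == ' ')) &&
   pCadena.toList.all (fun c => c == ' ' ||
     pClave.toList.all (fun k =>
       decide (167 ≤ (c.toLower.toNat : Int) + (k.toLower.toNat : Int)) &&
       decide ((c.toLower.toNat : Int) + (k.toLower.toNat : Int) ≤ 244)))) = true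

instance (pCadena : String) (pClave : String) : Decidable (Pre_codificarPorClave pCadena pClave) := by
  unfold Pre_codificarPorClave; infer_instance

def pvWitness_codificarPorClave : String × String := ("hola mundo", "clave")

def Spec_codificarPorClave (pCadena : String) (pClave : String) (out : String) : Prop := out = codificarPorClave_alt pCadena pClave
instance (pCadena : String) (pClave : String) (out : String) : Decidable (Spec_codificarPorClave pCadena pClave out) := by unfold Spec_codificarPorClave; infer_instance

-- ===== CLAIM (what is proved, stated in full; the proofs are below) =====
def Claim_equal_codificarPorClave : Prop := ∀ (pCadena : String) (pClave : String), Dom_codificarPorClave pCadena pClave → Pre_codificarPorClave pCadena pClave → Spec_codificarPorClave pCadena pClave (codificarPorClave pCadena pClave)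

-- ===== LEMMAS AND PROOFS =====

set_option maxRecDepth 100000 in
theorem pvWitness_ok :
    Dom_codificarPorClave pvWitness_codificarPorClave.1 pvWitness_codificarPorClave.2 ∧
    Pre_codificarPorClave pvWitness_codificarPorClave.1 pvWitness_codificarPorClave.2 := by
  decide

-- A's adjusted alphabet lookup agrees with B's closed form on the admitted shift range
set_option maxRecDepth 100000 in
theorem shift_closed_form (s : Int) (h1 : -25 ≤ s) (h2 : s ≤ 52) :
    (PySem.List.pyGet? "abcdefghijklmnopqrstuvwxyz".toList
        ((if s ≥ 26 then s - 26 else s) - 1)).getD ' '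
      = Char.ofNat (97 + (PySem.Int.mod (s - 1) 26).toNat) := by
  have key : ∀ t : Nat, t < 78 →
      (PySem.List.pyGet? "abcdefghijklmnopqrstuvwxyz".toList
        ((if ((t : Int) - 25) ≥ 26 then ((t : Int) - 25) - 26 else ((t : Int) - 25)) - 1)).getD ' '
      = Char.ofNat (97 + (PySem.Int.mod (((t : Int) - 25) - 1) 26).toNat) := by decide
  have ht : s = (((s + 25).toNat : Nat) : Int) - 25 := by omega
  rw [ht]
  exact key (s + 25).toNat (by omega)

theorem nueva_eq_codif (c k : Char)
    (h1 : 167 ≤ (c.toLower.toNat : Int) + (k.toLower.toNat : Int))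
    (h2 : (c.toLower.toNat : Int) + (k.toLower.toNat : Int) ≤ 244) :
    nuevaLetraPorClave c k = codifChar c (some k) := by
  have hs := shift_closed_form ((c.toLower.toNat : Int) + (k.toLower.toNat : Int) - 192)
    (by omega) (by omega)
  simp only [nuevaLetraPorClave, posicionLetra, codifChar]
  have harg : (c.toLower.toNat : Int) - 97 + 1 + ((k.toLower.toNat : Int) - 97 + 1)
      = (c.toLower.toNat : Int) + (k.toLower.toNat : Int) - 192 := by ring
  have harg2 : (c.toLower.toNat : Int) + (k.toLower.toNat : Int) - 192 - 1
      = (c.toLower.toNat : Int) + (k.toLower.toNat : Int) - 193 := by ring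
  rw [harg, hs, harg2]

theorem pyGet?_mem (xs : List Char) (i : Int) (h0 : 0 ≤ i) (h1 : i < (xs.length : Int)) :
    ∃ k, PySem.List.pyGet? xs i = some k ∧ k ∈ xs := by
  have h : PySem.List.pyGet? xs i = some (xs[i.toNat]'(by omega)) := by
    rw [PySem.List.pyGet?_of_nonneg xs h0, List.getElem?_eq_getElem]
  exact ⟨_, h, PySem.List.mem_of_pyGet?_eq_some xs h⟩

theorem align_spec (clave : List Char) (cs : List Char) (i : Int) (acc : List (Option Char)) :
    alignLoop clave acc cs i = acc ++ (alignLoop clave [] cs i) := by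
  induction cs generalizing i acc with
  | nil => simp [alignLoop]
  | cons c rest ih =>
    simp only [alignLoop, List.nil_append]
    by_cases hc : c = ' '
    · simp only [hc, reduceIte]
      rw [ih 0 (acc ++ [none]), ih 0 [none]]; simp
    · simp only [if_neg hc]
      rw [ih _ (acc ++ [_]), ih _ [_]]; simp

-- main loop correspondence
theorem loop_eq (clave : List Char) (cs : List Char) :
    ∀ (i : Int) (acc : List Char),
    0 ≤ i →
    (clave = [] → ∀ c ∈ cs, c = ' ') →
    (∀ c ∈ cs, c ≠ ' ' → ∀ k ∈ clave,
        167 ≤ (c.toLower.toNat : Int) + (k.toLower.toNat : Int) ∧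
        (c.toLower.toNat : Int) + (k.toLower.toNat : Int) ≤ 244) →
    codificarPorClaveLoop clave acc cs i
      = acc ++ (cs.zip (alignLoop clave [] cs i)).map (fun p => codifChar p.1 p.2) := by
  induction cs with
  | nil => intro i acc _ _ _; simp [codificarPorClaveLoop, alignLoop]
  | cons c rest ih =>
    intro i acc hi hkey hpre
    by_cases hc : c = ' '
    · subst hc
      simp only [codificarPorClaveLoop, alignLoop, List.nil_append, reduceIte]
      rw [align_spec clave rest 0 [none], ih 0 (acc ++ [' ']) le_rfl
        (fun h c' hc' => hkey h c' (List.mem_cons_of_mem _ hc'))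
        (fun c' hc' => hpre c' (List.mem_cons_of_mem _ hc'))]
      simp [codifChar]
    · have hclave : clave ≠ [] := by
        intro h; exact hc (hkey h c (List.mem_cons_self ..))
      simp only [codificarPorClaveLoop, alignLoop, List.nil_append, if_pos hc, if_neg hc]
      set i' : Int := if i ≥ (clave.length : Int) then 0 else i with hi'
      have hi'0 : 0 ≤ i' := by
        rw [hi']; split <;> omega
      have hi'lt : i' < (clave.length : Int) := by
        have : clave.length ≠ 0 := fun h => hclave (List.eq_nil_of_length_eq_zero h)
        rw [hi']; split <;> omega
      obtain ⟨k, hk, hkmem⟩ := pyGet?_mem clave i' hi'0 hi'lt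
      rw [align_spec clave rest (i' + 1) [PySem.List.pyGet? clave i'],
        ih (i' + 1) _ (by omega)
          (fun h c' hc' => hkey h c' (List.mem_cons_of_mem _ hc'))
          (fun c' hc' => hpre c' (List.mem_cons_of_mem _ hc'))]
      have hbnd := hpre c (List.mem_cons_self ..) hc k hkmem
      rw [hk]
      simp only [Option.getD_some]
      rw [nueva_eq_codif c k hbnd.1 hbnd.2]
      simp

-- ===== VERDICT (by name: the statement is the Claim_ definition above) =====
theorem codificarPorClave_spec : Claim_equal_codificarPorClave := by
  intro pCadena pClave _ hpre
  unfold Pre_codificarPorClave at hpre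
  simp only [Bool.and_eq_true, Bool.or_eq_true, Bool.not_eq_eq_eq_not, Bool.not_true,
    List.all_eq_true, beq_iff_eq, Bool.and_eq_true, decide_eq_true_eq] at hpre
  unfold Spec_codificarPorClave codificarPorClave codificarPorClave_alt
  rw [loop_eq pClave.toList pCadena.toList 0 [] le_rfl
    (fun h => by
      rcases hpre.1 with h' | h'
      · rw [h] at h'; simp at h' 
      · exact h')
    (fun c hc hcne k hk => by
      rcases hpre.2 c hc with h' | h'
      · exact absurd h' hcne
      · exact h' k hk)]
  simp
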